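-- pv_equiv track=rewrite | github.com/jsdaalder/deelnemers_lbvplus | pipelines/participants/scripts/08_classify_lbv_scheme.py | resolve_farm_scheme
-- ===== SOURCE A (Python) =====
-- SCHEME_LBV = "lbv"
--
-- SCHEME_LBV_PLUS = "lbv_plus"
--
-- SCHEME_AMBIGUOUS = "ambiguous"
--
-- SCHEME_UNKNOWN = "unknown"
--
-- def resolve_farm_scheme(labels: list[str]) -> str:
--     normalized = [label for label in labels if label and label != SCHEME_UNKNOWN]
--     if not normalized:
--         return SCHEME_AMBIGUOUS
--     if SCHEME_LBV_PLUS in normalized: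
--         return SCHEME_LBV_PLUS
--     if SCHEME_LBV in normalized:
--         return SCHEME_LBV
--     return SCHEME_AMBIGUOUS
-- ===== SOURCE B (Python) =====
-- SCHEME_LBV = "lbv"
-- SCHEME_LBV_PLUS = "lbv_plus"
-- SCHEME_AMBIGUOUS = "ambiguous"
-- SCHEME_UNKNOWN = "unknown"
--
-- def resolve_farm_scheme(labels: list[str]) -> str:
--     saw_valid = False
--     saw_lbv = False
--     for label in labels:
--         if not label or label == SCHEME_UNKNOWN:
--             continue
--         saw_valid = True
--         if label == SCHEME_LBV_PLUS:
--             return SCHEME_LBV_PLUS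
--         if label == SCHEME_LBV:
--             saw_lbv = True
--     if not saw_valid:
--         return SCHEME_AMBIGUOUS
--     return SCHEME_LBV if saw_lbv else SCHEME_AMBIGUOUS
-- ===== Notes on version B (the rewrite author's own statement) =====
-- stated objective: alternative
-- what changed: Replaces A's filter pass plus two membership scans over the filtered list with a single short-circuiting pass that keeps two boolean flags (saw a valid label, saw 'lbv') and returns 'lbv_plus' immediately when seen.
import Mathlib
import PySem

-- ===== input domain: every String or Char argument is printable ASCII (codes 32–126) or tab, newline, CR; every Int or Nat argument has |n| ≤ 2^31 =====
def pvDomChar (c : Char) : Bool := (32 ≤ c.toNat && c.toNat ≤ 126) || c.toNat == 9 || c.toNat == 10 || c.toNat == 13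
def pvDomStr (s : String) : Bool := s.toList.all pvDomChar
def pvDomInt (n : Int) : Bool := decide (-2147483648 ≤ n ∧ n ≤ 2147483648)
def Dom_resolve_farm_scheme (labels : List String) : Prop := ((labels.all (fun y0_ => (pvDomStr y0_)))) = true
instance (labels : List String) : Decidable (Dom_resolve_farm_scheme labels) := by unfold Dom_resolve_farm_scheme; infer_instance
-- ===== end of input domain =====

-- B replaces A's filter-then-two-membership-scans with one short-circuiting pass keeping two flags (alternative decomposition, same cost).


-- ===== PORT A =====
-- normalized = [label for label in labels if label and label != "unknown"]; then the two membership tests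
def resolve_farm_scheme (labels : List String) : String :=
  let normalized := labels.filter (fun label => label ≠ "" && label ≠ "unknown")
  if normalized = [] then "ambiguous"
  else if normalized.contains "lbv_plus" then "lbv_plus"
  else if normalized.contains "lbv" then "lbv"
  else "ambiguous"

-- ===== PORT B =====
-- the for-loop of Source B: early return on "lbv_plus", flags saw_valid / saw_lbv carried through
def resolveLoop : List String → Bool → Bool → String
  | [], sawValid, sawLbv =>
    if !sawValid then "ambiguous"
    else if sawLbv then "lbv" else "ambiguous"
  | label :: rest, sawValid, sawLbv =>
    if label = "" || label = "unknown" then resolveLoop rest sawValid sawLbv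
    else if label = "lbv_plus" then "lbv_plus"
    else resolveLoop rest true (sawLbv || label = "lbv")

def resolve_farm_scheme_alt (labels : List String) : String :=
  resolveLoop labels false false

-- ===== PRECONDITION & SPEC =====
def Spec_resolve_farm_scheme (labels : List String) (out : String) : Prop := out = resolve_farm_scheme_alt labels
instance (labels : List String) (out : String) : Decidable (Spec_resolve_farm_scheme labels out) := by unfold Spec_resolve_farm_scheme; infer_instance

-- ===== CLAIM (what is proved, stated in full; the proofs are below) =====
def Claim_equal_resolve_farm_scheme : Prop := ∀ (labels : List String), Dom_resolve_farm_scheme labels → Spec_resolve_farm_scheme labels (resolve_farm_scheme labels)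

-- ===== LEMMAS AND PROOFS =====

-- characterisation of the B-loop in terms of the filtered list A builds
theorem resolveLoop_eq (labels : List String) : ∀ (sv sl : Bool),
    resolveLoop labels sv sl =
      (let f := labels.filter (fun label => label ≠ "" && label ≠ "unknown")
       if f.contains "lbv_plus" then "lbv_plus"
       else if sv || !f.isEmpty then (if sl || f.contains "lbv" then "lbv" else "ambiguous")
       else "ambiguous") := by
  induction labels with
  | nil => intro sv sl; cases sv <;> cases sl <;> simp [resolveLoop]
  | cons label rest ih =>
    intro sv sl
    by_cases h1 : label = "" ∨ label = "unknown"
    · have : resolveLoop (label :: rest) sv sl = resolveLoop rest sv sl := by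
        rcases h1 with h | h <;> simp [resolveLoop, h]
      rw [this, ih]
      rcases h1 with h | h <;> simp [h, List.filter]
    · rw [not_or] at h1
      obtain ⟨h1a, h1b⟩ := h1
      have hf : (label :: rest).filter (fun label => label ≠ "" && label ≠ "unknown")
          = label :: rest.filter (fun label => label ≠ "" && label ≠ "unknown") := by
        simp [List.filter, h1a, h1b]
      by_cases h2 : label = "lbv_plus"
      · simp [resolveLoop, h2]
      · have : resolveLoop (label :: rest) sv sl = resolveLoop rest true (sl || label = "lbv") := by
          simp [resolveLoop, h1a, h1b, h2]
        rw [this, ih, hf]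
        simp only [List.contains_cons, List.isEmpty_cons]
        by_cases h3 : label = "lbv"
        · simp [h3]
        · simp [h3, Ne.symm h2, Ne.symm h3]

-- ===== VERDICT (by name: the statement is the Claim_ definition above) =====
theorem resolve_farm_scheme_spec : Claim_equal_resolve_farm_scheme := by
  intro labels _
  unfold Spec_resolve_farm_scheme resolve_farm_scheme resolve_farm_scheme_alt
  rw [resolveLoop_eq]
  simp only []
  set f := labels.filter (fun label => label ≠ "" && label ≠ "unknown") with hf
  by_cases he : f = []
  · simp [he]
  · have : f.isEmpty = false := by simp [he]
    by_cases hp : f.contains "lbv_plus" <;> by_cases hl : f.contains "lbv" <;>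
      simp [he, this]
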